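-- pv_equiv track=rewrite | github.com/jason19990305/NIKKE-Tool-AZX-Service-Time | project/solver.py | _build_prefix_sum_and_nodes
-- ===== SOURCE A (Python) =====
-- def _build_prefix_sum_and_nodes(matrix):
--     rows = len(matrix)
--     cols = len(matrix[0]) if rows > 0 else 0
--     p_sum = [[0] * (cols + 1) for _ in range(rows + 1)]
--     nodes = []
--
--     for r in range(rows):
--         for c in range(cols):
--             val = matrix[r][c]
--             p_sum[r+1][c+1] = (p_sum[r][c+1] + p_sum[r+1][c] - p_sum[r][c] + val)
--             if val > 0:
--                 nodes.append((r, c))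
--     return rows, cols, p_sum, nodes
-- ===== SOURCE B (Python) =====
-- def _build_prefix_sum_and_nodes(matrix):
--     rows = len(matrix)
--     cols = len(matrix[0]) if rows > 0 else 0
--     nodes = []
--     row_cums = []
--     for r in range(rows):
--         acc = 0
--         cum = [0]
--         for c in range(cols):
--             val = matrix[r][c]
--             acc += val
--             cum.append(acc)
--             if val > 0:
--                 nodes.append((r, c))
--         row_cums.append(cum)
--     p_sum = [[0] * (cols + 1)]
--     for cum in row_cums:
--         p_sum.append([a + b for a, b in zip(p_sum[-1], cum)])
--     return rows, cols, p_sum, nodes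
-- ===== Notes on version B (the rewrite author's own statement) =====
-- stated objective: alternative
-- what changed: Replaces A's single-pass inclusion-exclusion recurrence p[r+1][c+1]=p[r][c+1]+p[r+1][c]-p[r][c]+val over a preallocated mutable table by the separable two-pass construction: one row-major pass builds each row's running cumulative (collecting positive cells), a second pass builds the table by adding each cumulative row to the previous table row pointwise.
import Mathlib
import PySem

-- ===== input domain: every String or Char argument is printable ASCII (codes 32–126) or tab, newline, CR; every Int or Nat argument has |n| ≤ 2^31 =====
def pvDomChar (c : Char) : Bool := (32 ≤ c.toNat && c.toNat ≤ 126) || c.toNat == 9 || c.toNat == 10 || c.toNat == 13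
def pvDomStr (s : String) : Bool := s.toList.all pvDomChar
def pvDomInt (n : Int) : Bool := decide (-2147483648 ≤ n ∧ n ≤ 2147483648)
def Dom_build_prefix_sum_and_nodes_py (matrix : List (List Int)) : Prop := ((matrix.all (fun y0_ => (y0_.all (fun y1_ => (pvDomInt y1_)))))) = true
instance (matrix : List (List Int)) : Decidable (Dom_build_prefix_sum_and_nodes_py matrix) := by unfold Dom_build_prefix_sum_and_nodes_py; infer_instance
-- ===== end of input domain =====

-- B replaces A's inclusion-exclusion single-pass recurrence by the separable two-pass
-- construction (per-row running cumulatives, then adding the row above); objective: alternative.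

-- matrix[r][c] for indices known to be in range (0 default is never observed inside Pre_)
def pvCell (m : List (List Int)) (r c : Nat) : Int := (m.getD r []).getD c 0

-- ===== PORT A =====
-- p_sum[i][j] read / in-place write (Python list-of-lists indexing and assignment)
def pvGet2 (t : List (List Int)) (i j : Nat) : Int := (t.getD i []).getD j 0
def pvSet2 (t : List (List Int)) (i j : Nat) (v : Int) : List (List Int) :=
  t.set i ((t.getD i []).set j v)

def build_prefix_sum_and_nodes_py (matrix : List (List Int)) :
    Int × Int × List (List Int) × (List (Int × Int)) :=
  let rows := matrix.length
  let cols := if rows > 0 then (matrix.headD []).length else 0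
  let init : List (List Int) := List.replicate (rows + 1) (List.replicate (cols + 1) 0)
  let st :=
    (List.range rows).foldl (fun st r =>
      (List.range cols).foldl (fun (st : List (List Int) × List (Int × Int)) c =>
        let val := pvCell matrix r c
        let p := pvSet2 st.1 (r+1) (c+1)
          (pvGet2 st.1 r (c+1) + pvGet2 st.1 (r+1) c - pvGet2 st.1 r c + val)
        (p, if val > 0 then st.2 ++ [((r : Int), (c : Int))] else st.2)) st)
      (init, [])
  ((rows : Int), (cols : Int), st.1, st.2)

-- ===== PORT B =====
def build_prefix_sum_and_nodes_py_alt (matrix : List (List Int)) :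
    Int × Int × List (List Int) × (List (Int × Int)) :=
  let rows := matrix.length
  let cols := if rows > 0 then (matrix.headD []).length else 0
  -- first pass: per-row running cumulatives, collecting positive cells
  let st :=
    (List.range rows).foldl (fun (st : List (List Int) × List (Int × Int)) r =>
      let q :=
        (List.range cols).foldl (fun (q : Int × List Int × List (Int × Int)) c =>
          let val := pvCell matrix r c
          let acc := q.1 + val
          (acc, q.2.1 ++ [acc], if val > 0 then q.2.2 ++ [((r : Int), (c : Int))] else q.2.2))
          (0, [0], st.2)
      (st.1 ++ [q.2.1], q.2.2)) ([], [])
  -- second pass: each table row = previous table row + that row's cumulative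
  let p_sum :=
    st.1.foldl (fun ps cum => ps ++ [List.zipWith (· + ·) (ps.getD (ps.length - 1) []) cum])
      [List.replicate (cols + 1) 0]
  ((rows : Int), (cols : Int), p_sum, st.2)

-- ===== PRECONDITION & SPEC =====
-- Pre_ excludes exactly the ragged matrices with a row shorter than row 0, on which the
-- Python A raises IndexError (B raises there too).
def Pre_build_prefix_sum_and_nodes_py (matrix : List (List Int)) : Prop :=
  ∀ row ∈ matrix, (matrix.headD []).length ≤ row.length
instance (matrix : List (List Int)) : Decidable (Pre_build_prefix_sum_and_nodes_py matrix) := by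
  unfold Pre_build_prefix_sum_and_nodes_py; infer_instance

def pvWitness_build_prefix_sum_and_nodes_py : List (List Int) := [[1, -2], [3, 4]]

def Spec_build_prefix_sum_and_nodes_py (matrix : List (List Int)) (out : Int × Int × List (List Int) × (List (Int × Int))) : Prop := out = build_prefix_sum_and_nodes_py_alt matrix
instance (matrix : List (List Int)) (out : Int × Int × List (List Int) × (List (Int × Int))) : Decidable (Spec_build_prefix_sum_and_nodes_py matrix out) := by unfold Spec_build_prefix_sum_and_nodes_py; infer_instance

-- ===== CLAIM (what is proved, stated in full; the proofs are below) =====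
def Claim_equal_build_prefix_sum_and_nodes_py : Prop := ∀ (matrix : List (List Int)), Dom_build_prefix_sum_and_nodes_py matrix → Pre_build_prefix_sum_and_nodes_py matrix → Spec_build_prefix_sum_and_nodes_py matrix (build_prefix_sum_and_nodes_py matrix)

-- ===== LEMMAS AND PROOFS =====

-- reference quantities: row cumulative and 2D prefix sum
def pvRC (m : List (List Int)) (r j : Nat) : Int :=
  ((List.range j).map (fun c => pvCell m r c)).sum
def pvPS (m : List (List Int)) (i j : Nat) : Int :=
  ((List.range i).map (fun r => pvRC m r j)).sum
def pvRowOf (m : List (List Int)) (cols i : Nat) : List Int :=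
  (List.range (cols + 1)).map (fun j => pvPS m i j)
-- row r+1 of A's table after c inner steps
def pvPart (m : List (List Int)) (cols r c : Nat) : List Int :=
  (List.range (c + 1)).map (fun j => pvPS m (r+1) j) ++ List.replicate (cols - c) 0
-- A's table after k completed outer iterations
def pvTab (m : List (List Int)) (rows cols k : Nat) : List (List Int) :=
  (List.range (k + 1)).map (pvRowOf m cols) ++
    List.replicate (rows - k) (List.replicate (cols + 1) 0)
-- nodes accumulated over row r, columns < c, starting from ns
def pvNR (m : List (List Int)) (r : Nat) (ns : List (Int × Int)) (c : Nat) : List (Int × Int) :=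
  (List.range c).foldl
    (fun ns c' => if pvCell m r c' > 0 then ns ++ [((r : Int), (c' : Int))] else ns) ns
def pvNAll (m : List (List Int)) (cols : Nat) (ns : List (Int × Int)) (k : Nat) : List (Int × Int) :=
  (List.range k).foldl (fun ns r => pvNR m r ns cols) ns

theorem pvRC_zero (m : List (List Int)) (r : Nat) : pvRC m r 0 = 0 := by simp [pvRC]
theorem pvRC_succ (m : List (List Int)) (r j : Nat) :
    pvRC m r (j + 1) = pvRC m r j + pvCell m r j := by
  simp [pvRC, List.range_succ]
theorem pvPS_zero_i (m : List (List Int)) (j : Nat) : pvPS m 0 j = 0 := by simp [pvPS]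
theorem pvPS_succ_i (m : List (List Int)) (i j : Nat) :
    pvPS m (i + 1) j = pvPS m i j + pvRC m i j := by
  simp [pvPS, List.range_succ]
theorem pvPS_zero_j (m : List (List Int)) (i : Nat) : pvPS m i 0 = 0 := by
  induction i with
  | zero => simp [pvPS]
  | succ k ih => rw [pvPS_succ_i, ih]; simp [pvRC_zero]

theorem pvRowOf_zero (m : List (List Int)) (cols : Nat) :
    pvRowOf m cols 0 = List.replicate (cols + 1) 0 := by
  simp [pvRowOf, pvPS_zero_i]

theorem getD_append_lt {α : Type} (xs ys : List α) (i : Nat) (h : i < xs.length) (d : α) :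
    (xs ++ ys).getD i d = xs.getD i d := by
  simp [List.getD, List.getElem?_append_left h]
theorem getD_append_len {α : Type} (xs : List α) (y : α) (zs : List α) (d : α)
    (i : Nat) (h : i = xs.length) : (xs ++ y :: zs).getD i d = y := by
  subst h; simp [List.getD]
theorem getD_range_map {α : Type} (n i : Nat) (f : Nat → α) (h : i < n) (d : α) :
    ((List.range n).map f).getD i d = f i := by
  simp [List.getD, List.getElem?_map, List.getElem?_range h]
theorem set_append_len {α : Type} (xs : List α) (y v : α) (zs : List α)
    (i : Nat) (h : i = xs.length) : (xs ++ y :: zs).set i v = xs ++ v :: zs := by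
  subst h
  induction xs with
  | nil => simp
  | cons a t ih => simp [ih]

-- value computed by A's recurrence is the 2D prefix sum
theorem pvVal_step (m : List (List Int)) (r c : Nat) :
    pvPS m r (c+1) + pvPS m (r+1) c - pvPS m r c + pvCell m r c = pvPS m (r+1) (c+1) := by
  rw [pvPS_succ_i, pvPS_succ_i, pvRC_succ]; ring

theorem pvNR_succ (m : List (List Int)) (r : Nat) (ns : List (Int × Int)) (c : Nat) :
    pvNR m r ns (c+1) =
      (if pvCell m r c > 0 then pvNR m r ns c ++ [((r : Int), (c : Int))] else pvNR m r ns c) := by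
  simp only [pvNR, List.range_succ, List.foldl_append, List.foldl_cons, List.foldl_nil]

-- ----- A side -----
def pvTabP (m : List (List Int)) (rows cols r c : Nat) : List (List Int) :=
  (List.range (r + 1)).map (pvRowOf m cols) ++
    (pvPart m cols r c :: List.replicate (rows - r - 1) (List.replicate (cols + 1) 0))

theorem pvPart_zero (m : List (List Int)) (cols r : Nat) :
    pvPart m cols r 0 = List.replicate (cols + 1) 0 := by
  have : pvPS m (r+1) 0 = 0 := pvPS_zero_j m (r+1)
  simp [pvPart, List.range_succ, this, List.eq_replicate_iff]

theorem pvTabP_zero (m : List (List Int)) (rows cols r : Nat) (hr : r < rows) :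
    pvTabP m rows cols r 0 = pvTab m rows cols r := by
  rw [pvTabP, pvPart_zero, pvTab]
  congr 1
  rw [show rows - r = (rows - r - 1) + 1 by omega]
  rfl

theorem pvTabP_last (m : List (List Int)) (rows cols r : Nat) (_hr : r < rows) :
    pvTabP m rows cols r cols = pvTab m rows cols (r + 1) := by
  rw [pvTabP, pvTab]
  have h1 : pvPart m cols r cols = pvRowOf m cols (r + 1) := by
    simp [pvPart, pvRowOf]
  rw [h1, List.range_succ (n := r + 1), List.map_append]
  simp [show rows - (r+1) = rows - r - 1 by omega]

theorem pvA_inner (m : List (List Int)) (rows cols r : Nat) (_hr : r < rows)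
    (ns : List (Int × Int)) :
    ∀ c, c ≤ cols →
      (List.range c).foldl (fun (st : List (List Int) × List (Int × Int)) c =>
        let val := pvCell m r c
        let p := pvSet2 st.1 (r+1) (c+1)
          (pvGet2 st.1 r (c+1) + pvGet2 st.1 (r+1) c - pvGet2 st.1 r c + val)
        (p, if val > 0 then st.2 ++ [((r : Int), (c : Int))] else st.2))
        (pvTabP m rows cols r 0, ns)
      = (pvTabP m rows cols r c, pvNR m r ns c) := by
  intro c hc
  induction c with
  | zero => simp [pvNR]
  | succ c ih =>
    have hc' : c ≤ cols := Nat.le_of_succ_le hc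
    have hclt : c < cols := hc
    rw [List.range_succ, List.foldl_append, ih hc', List.foldl_cons, List.foldl_nil]
    have hlen : ((List.range (r + 1)).map (pvRowOf m cols)).length = r + 1 := by simp
    have hrowr : (pvTabP m rows cols r c).getD r [] = pvRowOf m cols r := by
      rw [pvTabP, getD_append_lt _ _ r (by simp), getD_range_map _ _ _ (by omega)]
    have hrowr1 : (pvTabP m rows cols r c).getD (r+1) [] = pvPart m cols r c := by
      rw [pvTabP, getD_append_len _ _ _ _ _ (by simp)]
    have hg1 : pvGet2 (pvTabP m rows cols r c) r (c+1) = pvPS m r (c+1) := by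
      rw [pvGet2, hrowr, pvRowOf, getD_range_map _ _ _ (by omega)]
    have hg2 : pvGet2 (pvTabP m rows cols r c) (r+1) c = pvPS m (r+1) c := by
      rw [pvGet2, hrowr1, pvPart, getD_append_lt _ _ c (by simp), getD_range_map _ _ _ (by omega)]
    have hg3 : pvGet2 (pvTabP m rows cols r c) r c = pvPS m r c := by
      rw [pvGet2, hrowr, pvRowOf, getD_range_map _ _ _ (by omega)]
    have hsetrow : (pvPart m cols r c).set (c+1) (pvPS m (r+1) (c+1)) = pvPart m cols r (c+1) := by
      rw [pvPart, show cols - c = (cols - c - 1) + 1 by omega, List.replicate_succ,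
        set_append_len _ _ _ _ _ (by simp), pvPart]
      rw [List.range_succ (n := c + 1), List.map_append]
      simp [show cols - (c+1) = cols - c - 1 by omega]
    have hset : pvSet2 (pvTabP m rows cols r c) (r+1) (c+1) (pvPS m (r+1) (c+1))
        = pvTabP m rows cols r (c+1) := by
      rw [pvSet2, hrowr1, hsetrow, pvTabP, pvTabP, set_append_len _ _ _ _ _ (by simp)]
    simp only [hg1, hg2, hg3, pvVal_step, hset, pvNR_succ]

theorem pvTab_zero (m : List (List Int)) (rows cols : Nat) :
    pvTab m rows cols 0 = List.replicate (rows + 1) (List.replicate (cols + 1) 0) := by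
  simp [pvTab, pvRowOf_zero, List.replicate_succ]

theorem pvNAll_succ (m : List (List Int)) (cols : Nat) (ns : List (Int × Int)) (k : Nat) :
    pvNAll m cols ns (k+1) = pvNR m k (pvNAll m cols ns k) cols := by
  simp only [pvNAll, List.range_succ, List.foldl_append, List.foldl_cons, List.foldl_nil]

theorem pvA_outer (m : List (List Int)) (rows cols : Nat) :
    ∀ k, k ≤ rows →
      (List.range k).foldl (fun st r =>
        (List.range cols).foldl (fun (st : List (List Int) × List (Int × Int)) c =>
          let val := pvCell m r c
          let p := pvSet2 st.1 (r+1) (c+1)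
            (pvGet2 st.1 r (c+1) + pvGet2 st.1 (r+1) c - pvGet2 st.1 r c + val)
          (p, if val > 0 then st.2 ++ [((r : Int), (c : Int))] else st.2)) st)
        (List.replicate (rows + 1) (List.replicate (cols + 1) 0), [])
      = (pvTab m rows cols k, pvNAll m cols [] k) := by
  intro k hk
  induction k with
  | zero => simp [pvTab_zero, pvNAll]
  | succ k ih =>
    have hk' : k ≤ rows := Nat.le_of_succ_le hk
    have hklt : k < rows := hk
    rw [List.range_succ, List.foldl_append, ih hk', List.foldl_cons, List.foldl_nil]
    rw [← pvTabP_zero m rows cols k hklt, pvA_inner m rows cols k hklt _ cols (Nat.le_refl _),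
      pvTabP_last m rows cols k hklt, pvNAll_succ]

-- ----- B side -----
theorem pvB_inner (m : List (List Int)) (cols r : Nat) (ns : List (Int × Int)) :
    ∀ c, c ≤ cols →
      (List.range c).foldl (fun (q : Int × List Int × List (Int × Int)) c =>
        let val := pvCell m r c
        let acc := q.1 + val
        (acc, q.2.1 ++ [acc], if val > 0 then q.2.2 ++ [((r : Int), (c : Int))] else q.2.2))
        (0, [0], ns)
      = (pvRC m r c, (List.range (c+1)).map (fun j => pvRC m r j), pvNR m r ns c) := by
  intro c hc
  induction c with
  | zero => simp [pvNR, List.range_succ, pvRC]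
  | succ c ih =>
    rw [List.range_succ, List.foldl_append, ih (Nat.le_of_succ_le hc),
      List.foldl_cons, List.foldl_nil]
    simp only [← pvRC_succ, pvNR_succ]
    rw [List.range_succ (n := c + 1), List.map_append]
    by_cases h : pvCell m r c > 0 <;> simp [h]

theorem pvB_outer (m : List (List Int)) (rows cols : Nat) :
    ∀ k, k ≤ rows →
      (List.range k).foldl (fun (st : List (List Int) × List (Int × Int)) r =>
        let q :=
          (List.range cols).foldl (fun (q : Int × List Int × List (Int × Int)) c =>
            let val := pvCell m r c
            let acc := q.1 + val
            (acc, q.2.1 ++ [acc], if val > 0 then q.2.2 ++ [((r : Int), (c : Int))] else q.2.2))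
            (0, [0], st.2)
        (st.1 ++ [q.2.1], q.2.2)) ([], [])
      = ((List.range k).map (fun r => (List.range (cols+1)).map (fun j => pvRC m r j)),
         pvNAll m cols [] k) := by
  intro k hk
  induction k with
  | zero => simp [pvNAll]
  | succ k ih =>
    rw [List.range_succ, List.foldl_append, ih (Nat.le_of_succ_le hk),
      List.foldl_cons, List.foldl_nil]
    simp only [pvB_inner m cols k _ cols (Nat.le_refl _), pvNAll_succ]
    simp [List.range_succ]

theorem pvB_second (m : List (List Int)) (cols : Nat) :
    ∀ k,
      ((List.range k).map (fun r => (List.range (cols+1)).map (fun j => pvRC m r j))).foldl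
        (fun ps cum => ps ++ [List.zipWith (· + ·) (ps.getD (ps.length - 1) []) cum])
        [List.replicate (cols + 1) 0]
      = (List.range (k+1)).map (pvRowOf m cols) := by
  intro k
  induction k with
  | zero => simp [pvRowOf_zero]
  | succ k ih =>
    rw [show List.range (k+1) = List.range k ++ [k] from List.range_succ,
      List.map_append, List.foldl_append, ih, List.map_cons, List.map_nil,
      List.foldl_cons, List.foldl_nil]
    have hlen : ((List.range (k+1)).map (pvRowOf m cols)).length = k + 1 := by simp
    have hlast : ((List.range (k+1)).map (pvRowOf m cols)).getD
        (((List.range (k+1)).map (pvRowOf m cols)).length - 1) [] = pvRowOf m cols k := by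
      rw [hlen]
      exact getD_range_map _ _ _ (by omega) _
    rw [hlast, show List.range (k+2) = List.range (k+1) ++ [k+1] from List.range_succ,
      List.map_append]
    congr 1
    simp only [pvRowOf, List.zipWith_map, List.zipWith_self]
    simp [pvRowOf, pvPS_succ_i]

-- ===== VERDICT (by name: the statement is the Claim_ definition above) =====
theorem build_prefix_sum_and_nodes_py_spec : Claim_equal_build_prefix_sum_and_nodes_py := by
  intro m _ _
  unfold Spec_build_prefix_sum_and_nodes_py
  unfold build_prefix_sum_and_nodes_py build_prefix_sum_and_nodes_py_alt
  simp only
  rw [pvA_outer m m.length _ m.length (Nat.le_refl _),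
    pvB_outer m m.length _ m.length (Nat.le_refl _)]
  simp only [pvB_second]
  rw [pvTab]
  simp
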